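-- pv_equiv track=rewrite | github.com/arifkhan1990/HackerEarth-solution | Contest/December Circuits '23/Bob and Indices.py | count_good_pairs
-- ===== SOURCE A (Python) =====
-- def count_good_pairs(A, B, C):
--     # Create a dictionary to store occurrences of B[C[j]]
--     b_c_occurrences = {}
--
--     # Count the occurrences of B[C[j]]
--     for j in C:
--         if 0 <= j < len(B):
--             b_c_occurrences[B[j]] = b_c_occurrences.get(B[j], 0) + 1
--
--     # Count the good pairs during a single pass through A
--     good_pairs_count = 0
--
--     for a in A:
--         if a in b_c_occurrences:
--             good_pairs_count += b_c_occurrences[a]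
--
--     return good_pairs_count
-- ===== SOURCE B (Python) =====
-- def count_good_pairs(A, B, C):
--     # Tabulate the A side instead: count occurrences of each value in A,
--     # then a single pass over C adds the A-count of B[j] for each valid index j.
--     cntA = {}
--     for a in A:
--         cntA[a] = cntA.get(a, 0) + 1
--     return sum(cntA.get(B[j], 0) for j in C if 0 <= j < len(B))
-- ===== Notes on version B (the rewrite author's own statement) =====
-- stated objective: alternative
-- what changed: A tabulates B[C[j]] occurrences in a dict and accumulates during a scan of A; B instead tabulates a frequency table of A and accumulates A-counts during a single scan of C, a converse decomposition of the same double count.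
import Mathlib
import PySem

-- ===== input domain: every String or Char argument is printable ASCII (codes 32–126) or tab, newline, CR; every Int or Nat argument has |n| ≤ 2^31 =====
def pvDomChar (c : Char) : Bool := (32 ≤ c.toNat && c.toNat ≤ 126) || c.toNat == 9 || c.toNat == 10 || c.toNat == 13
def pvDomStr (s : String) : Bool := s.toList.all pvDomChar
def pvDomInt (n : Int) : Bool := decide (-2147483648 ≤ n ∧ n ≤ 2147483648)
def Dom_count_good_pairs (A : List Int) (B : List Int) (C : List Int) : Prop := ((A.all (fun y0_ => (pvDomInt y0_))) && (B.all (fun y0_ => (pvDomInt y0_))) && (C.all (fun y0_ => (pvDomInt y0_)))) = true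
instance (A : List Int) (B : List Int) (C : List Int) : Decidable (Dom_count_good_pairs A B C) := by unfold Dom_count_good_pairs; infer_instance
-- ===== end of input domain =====

-- B tabulates a frequency table of A and sums A-counts during one scan of C,
-- the converse decomposition of A's "tabulate B[C[j]], then scan A" (objective: alternative).

-- ===== PORT A =====
def count_good_pairs (A : List Int) (B : List Int) (C : List Int) : Int :=
  let d : PySem.Dict Int Int := C.foldl (fun d j =>
    if 0 ≤ j ∧ j < (B.length : Int) then
      d.insert (PySem.List.pyGetD B j 0) (d.getD (PySem.List.pyGetD B j 0) 0 + 1)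
    else d) PySem.Dict.empty
  A.foldl (fun acc a => if d.contains a then acc + d.getD a 0 else acc) 0

-- ===== PORT B =====
def count_good_pairs_alt (A : List Int) (B : List Int) (C : List Int) : Int :=
  let cntA : PySem.Dict Int Int := A.foldl (fun d a => d.insert a (d.getD a 0 + 1)) PySem.Dict.empty
  C.foldl (fun acc j =>
    if 0 ≤ j ∧ j < (B.length : Int) then acc + cntA.getD (PySem.List.pyGetD B j 0) 0 else acc) 0

-- ===== PRECONDITION & SPEC =====
def Spec_count_good_pairs (A : List Int) (B : List Int) (C : List Int) (out : Int) : Prop := out = count_good_pairs_alt A B C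
instance (A : List Int) (B : List Int) (C : List Int) (out : Int) : Decidable (Spec_count_good_pairs A B C out) := by unfold Spec_count_good_pairs; infer_instance

-- ===== CLAIM (what is proved, stated in full; the proofs are below) =====
def Claim_equal_count_good_pairs : Prop := ∀ (A : List Int) (B : List Int) (C : List Int), Dom_count_good_pairs A B C → Spec_count_good_pairs A B C (count_good_pairs A B C)

-- ===== LEMMAS AND PROOFS =====

-- A's dict loop over C is the counter of the filtered-and-indexed list L.
theorem dictA_eq_counter (B C : List Int) (d0 : PySem.Dict Int Int) :
    C.foldl (fun d j =>
      if 0 ≤ j ∧ j < (B.length : Int) then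
        d.insert (PySem.List.pyGetD B j 0) (d.getD (PySem.List.pyGetD B j 0) 0 + 1)
      else d) d0
    = ((C.filter (fun j => decide (0 ≤ j ∧ j < (B.length : Int)))).map
        (fun j => PySem.List.pyGetD B j 0)).foldl
        (fun d x => d.insert x (d.getD x 0 + 1)) d0 := by
  induction C generalizing d0 with
  | nil => rfl
  | cons c C ih =>
    by_cases h : 0 ≤ c ∧ c < (B.length : Int) <;>
      simp [h, ih]

-- a guarded-add fold is the sum of a guarded map
theorem foldl_if_add (C : List Int) (p : Int → Prop) [DecidablePred p] (f : Int → Int) (a : Int) :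
    C.foldl (fun acc j => if p j then acc + f j else acc) a
    = a + (C.map (fun j => if p j then f j else 0)).sum := by
  have : (fun (acc : Int) j => if p j then acc + f j else acc)
       = (fun acc j => acc + (if p j then f j else 0)) := by
    funext acc j; by_cases h : p j <;> simp [h]
  rw [this, PySem.List.foldl_add]

-- the double count, exchanged
theorem count_exchange (A L : List Int) :
    (A.map (fun a => (L.count a : Int))).sum = (L.map (fun x => (A.count x : Int))).sum := by
  induction A with
  | nil => simp
  | cons a A ih =>
    have h1 : L.map (fun x => (((a :: A).count x : Nat) : Int))
        = L.map (fun x => (A.count x : Int) + (if (x == a) = true then (1:Int) else 0)) := by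
      apply List.map_congr_left; intro x _
      by_cases h : x = a
      · subst h; rw [List.count_cons_self]; push_cast; simp
      · rw [List.count_cons_of_ne (Ne.symm h)]; simp [h]
    rw [List.map_cons, List.sum_cons, ih, h1, PySem.List.sum_map_add_int,
        PySem.List.sum_map_ite_one_zero]
    have h2 : L.countP (fun x => x == a) = L.count a := by simp [List.count]
    rw [h2]; ring

-- a sum over a guarded map is a sum over the filtered, mapped list
theorem sum_map_if_filter (C : List Int) (p : Int → Prop) [DecidablePred p] (f : Int → Int) :
    (C.map (fun j => if p j then f j else 0)).sum
    = ((C.filter (fun j => decide (p j))).map f).sum := by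
  induction C with
  | nil => rfl
  | cons c C ih =>
    by_cases h : p c <;> simp [h, ih]

-- ===== VERDICT (by name: the statement is the Claim_ definition above) =====
theorem count_good_pairs_spec : Claim_equal_count_good_pairs := by
  intro A B C _
  unfold Spec_count_good_pairs count_good_pairs count_good_pairs_alt
  simp only []
  set L : List Int := ((C.filter (fun j => decide (0 ≤ j ∧ j < (B.length : Int)))).map
      (fun j => PySem.List.pyGetD B j 0)) with hL
  rw [dictA_eq_counter, PySem.Dict.foldl_insert_getD_add_one_eq_counter,
      PySem.Dict.foldl_insert_getD_add_one_eq_counter]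
  -- A side: each step adds L.count a, with or without the membership test
  have hA : A.foldl (fun acc a => if (PySem.Dict.counter L).contains a then acc + (PySem.Dict.counter L).getD a 0 else acc) 0
      = (A.map (fun a => (L.count a : Int))).sum := by
    have : (fun (acc : Int) a => if (PySem.Dict.counter L).contains a then acc + (PySem.Dict.counter L).getD a 0 else acc)
         = (fun acc a => acc + (L.count a : Int)) := by
      funext acc a
      by_cases h : (PySem.Dict.counter L).contains a = true
      · simp [h, PySem.Dict.getD_counter]
      · have : a ∉ L := by
          intro hm
          exact h (by simp [PySem.Dict.contains_counter, hm])
        simp [h, List.count_eq_zero_of_not_mem this]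
    rw [this, PySem.List.foldl_add]; simp
  rw [hA, foldl_if_add, count_exchange, sum_map_if_filter]
  simp [hL, List.map_map, PySem.Dict.getD_counter, Function.comp_def]
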